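-- pv_equiv track=rewrite | github.com/JesseWebDotCom/loki-doki | lokidoki/orchestrator/skills/finance.py | _find_currency_codes
-- ===== SOURCE A (Python) =====
-- _CURRENCY_ALIASES = {
--     "usd": "USD",
--     "dollar": "USD",
--     "dollars": "USD",
--     "us dollar": "USD",
--     "eur": "EUR",
--     "euro": "EUR",
--     "euros": "EUR",
--     "gbp": "GBP",
--     "pound": "GBP",
--     "pounds": "GBP",
--     "british pound": "GBP",
--     "jpy": "JPY",
--     "yen": "JPY",
--     "cad": "CAD",
--     "canadian dollar": "CAD",
--     "aud": "AUD",
--     "australian dollar": "AUD",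
-- }
--
-- def _find_currency_codes(text: str) -> list[str]:
--     lower = text.lower()
--     found: list[tuple[int, str]] = []
--     for alias, code in sorted(_CURRENCY_ALIASES.items(), key=lambda item: len(item[0]), reverse=True):
--         idx = lower.find(alias)
--         if idx >= 0:
--             found.append((idx, code))
--     found.sort(key=lambda item: item[0])
--     out: list[str] = []
--     for _, code in found:
--         if code not in out:
--             out.append(code)
--     return out
-- ===== SOURCE B (Python) =====
-- _CURRENCY_ALIASES = {
--     "usd": "USD",
--     "dollar": "USD",
--     "dollars": "USD",
--     "us dollar": "USD",
--     "eur": "EUR",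
--     "euro": "EUR",
--     "euros": "EUR",
--     "gbp": "GBP",
--     "pound": "GBP",
--     "pounds": "GBP",
--     "british pound": "GBP",
--     "jpy": "JPY",
--     "yen": "JPY",
--     "cad": "CAD",
--     "canadian dollar": "CAD",
--     "aud": "AUD",
--     "australian dollar": "AUD",
-- }
--
-- def _find_currency_codes(text: str) -> list[str]:
--     lower = text.lower()
--     best: dict[str, int] = {}
--     for alias, code in _CURRENCY_ALIASES.items():
--         idx = lower.find(alias)
--         if idx >= 0 and (code not in best or idx < best[code]):
--             best[code] = idx
--     return [code for code, _ in sorted(best.items(), key=lambda kv: kv[1])]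
-- ===== Notes on version B (the rewrite author's own statement) =====
-- stated objective: simpler
-- what changed: Replaces the length-descending alias sort, the (index, code) collect-then-sort pipeline and the final dedup loop with a single pass over the alias table that keeps, per currency code, the minimum match index in a dict, then returns the codes sorted by that stored index.
import Mathlib
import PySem

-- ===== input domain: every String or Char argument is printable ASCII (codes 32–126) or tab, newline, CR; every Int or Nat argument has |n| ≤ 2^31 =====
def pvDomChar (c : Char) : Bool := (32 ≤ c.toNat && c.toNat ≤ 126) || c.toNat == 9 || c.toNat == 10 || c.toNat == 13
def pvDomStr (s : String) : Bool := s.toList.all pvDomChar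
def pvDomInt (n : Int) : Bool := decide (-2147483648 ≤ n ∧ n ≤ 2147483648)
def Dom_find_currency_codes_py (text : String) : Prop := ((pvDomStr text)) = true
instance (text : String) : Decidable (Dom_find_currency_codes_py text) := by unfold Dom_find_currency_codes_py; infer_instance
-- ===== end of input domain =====

-- B replaces A's length-descending alias sort + collect-(idx,code)-then-sort-then-dedup pipeline by one pass
-- keeping the minimum match index per code in a dict, then sorting the codes by that index (objective: simpler).

-- the module constant _CURRENCY_ALIASES (a dict literal with distinct keys): its items in insertion order
def pvCurrencyAliases : List (String × String) :=
  [("usd", "USD"), ("dollar", "USD"), ("dollars", "USD"), ("us dollar", "USD"),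
   ("eur", "EUR"), ("euro", "EUR"), ("euros", "EUR"),
   ("gbp", "GBP"), ("pound", "GBP"), ("pounds", "GBP"), ("british pound", "GBP"),
   ("jpy", "JPY"), ("yen", "JPY"),
   ("cad", "CAD"), ("canadian dollar", "CAD"),
   ("aud", "AUD"), ("australian dollar", "AUD")]

-- ===== PORT A =====
def find_currency_codes_py (text : String) : List String :=
  let lower := PySem.Str.lower text
  let found := (PySem.List.sorted pvCurrencyAliases (fun item => PySem.Str.len item.1) true).foldl
      (fun found item =>
        let idx := PySem.Str.find lower item.1
        if 0 ≤ idx then found ++ [(idx, item.2)] else found) []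
  let foundSorted := PySem.List.sorted found (fun item => item.1) false
  foundSorted.foldl (fun out item => if item.2 ∈ out then out else out ++ [item.2]) []

-- ===== PORT B =====
-- 'idx >= 0 and (code not in best or idx < best[code])': best[code] (= getD) is only consulted when the key is present
def find_currency_codes_py_alt (text : String) : List String :=
  let lower := PySem.Str.lower text
  let best := pvCurrencyAliases.foldl
      (fun best item =>
        let idx := PySem.Str.find lower item.1
        if 0 ≤ idx ∧ (best.contains item.2 = false ∨ idx < best.getD item.2 0)
        then best.insert item.2 idx else best)
      PySem.Dict.empty
  (PySem.List.sorted best.items (fun kv => kv.2) false).map (fun kv => kv.1)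

-- ===== PRECONDITION & SPEC =====
def Spec_find_currency_codes_py (text : String) (out : List String) : Prop := out = find_currency_codes_py_alt text
instance (text : String) (out : List String) : Decidable (Spec_find_currency_codes_py text out) := by unfold Spec_find_currency_codes_py; infer_instance

-- ===== CLAIM (what is proved, stated in full; the proofs are below) =====
def Claim_equal_find_currency_codes_py : Prop := ∀ (text : String), Dom_find_currency_codes_py text → Spec_find_currency_codes_py text (find_currency_codes_py text)

-- ===== LEMMAS AND PROOFS =====

-- the match index of an alias in the lowered text
def pvf (lw a : String) : Int := PySem.Str.find lw a

-- all match indices (≥ 0) of the aliases of code c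
def pvVals (lw c : String) : List Int :=
  (pvCurrencyAliases.filter (fun p => p.2 == c && decide (0 ≤ pvf lw p.1))).map (fun p => pvf lw p.1)

-- the minimum match index of code c (0 if c has no matching alias)
def pvK (lw c : String) : Int := (PySem.List.min? (pvVals lw c) (fun v => v)).getD 0

lemma pvVals_mem (lw c : String) (v : Int) :
    v ∈ pvVals lw c ↔ ∃ p ∈ pvCurrencyAliases, p.2 = c ∧ 0 ≤ pvf lw p.1 ∧ v = pvf lw p.1 := by
  simp only [pvVals, List.mem_map, List.mem_filter, Bool.and_eq_true, beq_iff_eq, decide_eq_true_eq]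
  constructor
  · rintro ⟨p, ⟨hp, h2, h0⟩, rfl⟩; exact ⟨p, hp, h2, h0, rfl⟩
  · rintro ⟨p, hp, h2, h0, rfl⟩; exact ⟨p, ⟨hp, h2, h0⟩, rfl⟩

-- a found alias occurs (as a prefix) at its match position in the text
lemma pv_find_prefix (lw a : String) (h : 0 ≤ PySem.Str.find lw a) :
    a.toList <+: (lw.toList.drop (PySem.Str.find lw a).toNat) := by
  have hf : PySem.Str.find lw a = PySem.Chars.find lw.toList a.toList := by simp
  rw [hf] at h ⊢
  have h0 : (0:Nat) ≤ lw.toList.length := Nat.zero_le _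
  have hz : (((0:Nat)):Int) = (0:Int) := by norm_num
  have hne : PySem.Chars.findFrom lw.toList a.toList (((0:Nat)):Int) ≠ -1 := by
    rw [hz, PySem.Chars.findFrom_zero]; omega
  have hspec := (PySem.Chars.findFrom_natCast_spec lw.toList a.toList 0 h0 hne).2.1
  rwa [hz, PySem.Chars.findFrom_zero] at hspec

-- in the fixed alias table, an alias that is a prefix of another belongs to the same currency
lemma pv_alias_prefix_code :
    ∀ p ∈ pvCurrencyAliases, ∀ q ∈ pvCurrencyAliases, p.1.toList <+: q.1.toList → p.2 = q.2 := by
  decide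

-- two aliases first occurring at the same position are prefix-related, hence share their code
lemma pv_find_eq_code_eq (lw : String) :
    ∀ p ∈ pvCurrencyAliases, ∀ q ∈ pvCurrencyAliases,
      0 ≤ pvf lw p.1 → pvf lw p.1 = pvf lw q.1 → p.2 = q.2 := by
  intro p hp q hq h0 heq
  have h0q : 0 ≤ pvf lw q.1 := heq ▸ h0
  have hP := pv_find_prefix lw p.1 h0
  have hQ := pv_find_prefix lw q.1 h0q
  simp only [pvf] at heq
  rw [heq] at hP
  rcases List.prefix_or_prefix_of_prefix hP hQ with h | h
  · exact pv_alias_prefix_code p hp q hq h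
  · exact (pv_alias_prefix_code q hq p hp h).symm

lemma pvK_some (lw c : String) (h : pvVals lw c ≠ []) :
    PySem.List.min? (pvVals lw c) (fun v => v) = some (pvK lw c) := by
  cases hm : PySem.List.min? (pvVals lw c) (fun v => v) with
  | none => exact absurd ((PySem.List.min?_eq_none_iff _ _).1 hm) h
  | some m => rw [pvK, hm]; rfl

lemma pvK_mem (lw c : String) (h : pvVals lw c ≠ []) : pvK lw c ∈ pvVals lw c :=
  PySem.List.min?_mem (pvK_some lw c h)

lemma pvK_isMin (lw c : String) (v : Int) (hv : v ∈ pvVals lw c) : pvK lw c ≤ v := by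
  have h : pvVals lw c ≠ [] := List.ne_nil_of_mem hv
  exact PySem.List.min?_isMin (pvK_some lw c h) v hv

-- the minimum match indices of two distinct matched codes differ
lemma pvK_inj (lw c d : String) (hc : pvVals lw c ≠ []) (hd : pvVals lw d ≠ [])
    (h : pvK lw c = pvK lw d) : c = d := by
  obtain ⟨p, hp, hpc, hp0, hpe⟩ := (pvVals_mem lw c _).1 (pvK_mem lw c hc)
  obtain ⟨q, hq, hqd, hq0, hqe⟩ := (pvVals_mem lw d _).1 (pvK_mem lw d hd)
  have : p.2 = q.2 := pv_find_eq_code_eq lw p hp q hq hp0 (by omega)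
  rw [← hpc, this, hqd]

-- ---------- A side ----------

def pvFound (lw : String) : List (Int × String) :=
  ((PySem.List.sorted pvCurrencyAliases (fun item => PySem.Str.len item.1) true).filter
      (fun p => decide (0 ≤ pvf lw p.1))).map (fun p => (pvf lw p.1, p.2))

def pvSA (lw : String) : List (Int × String) := PySem.List.sorted (pvFound lw) (fun item => item.1) false

def pvOutA (lw : String) : List String :=
  (pvSA lw).foldl (fun out item => if item.2 ∈ out then out else out ++ [item.2]) []

lemma portA_eq (text : String) : find_currency_codes_py text = pvOutA (PySem.Str.lower text) := by
  unfold find_currency_codes_py pvOutA pvSA pvFound pvf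
  dsimp only
  rw [PySem.List.foldl_append_ite (fun item => 0 ≤ PySem.Str.find (PySem.Str.lower text) item.1)
    (fun item => (PySem.Str.find (PySem.Str.lower text) item.1, item.2))
    (PySem.List.sorted pvCurrencyAliases (fun item => PySem.Str.len item.1) true) []]
  simp

lemma pvSA_mem (lw : String) (e : Int × String) :
    e ∈ pvSA lw ↔ ∃ p ∈ pvCurrencyAliases, p.2 = e.2 ∧ 0 ≤ pvf lw p.1 ∧ e.1 = pvf lw p.1 := by
  rw [pvSA, PySem.List.mem_sorted, pvFound]
  simp only [List.mem_map, List.mem_filter, PySem.List.mem_sorted, decide_eq_true_eq]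
  constructor
  · rintro ⟨p, ⟨hp, h0⟩, rfl⟩; exact ⟨p, hp, rfl, h0, rfl⟩
  · rintro ⟨p, hp, h2, h0, h1⟩
    exact ⟨p, ⟨hp, h0⟩, by cases e; simp_all⟩

-- generic: dedup-by-code of a list sorted by index is ordered by minimal index
lemma pv_dedup_pairwise (Kf : String → Int) (l0 : List (Int × String))
    (H1 : l0.Pairwise (fun p q => p.1 ≤ q.1))
    (H2 : ∀ p ∈ l0, Kf p.2 ≤ p.1)
    (H3 : ∀ p ∈ l0, ∃ q ∈ l0, q.2 = p.2 ∧ q.1 = Kf p.2) :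
    ∀ (l pre : List (Int × String)) (acc : List String),
      l0 = pre ++ l →
      acc.Pairwise (fun c d => Kf c ≤ Kf d) →
      (∀ c ∈ acc, ∀ p ∈ l, p.2 ∉ acc → Kf c ≤ Kf p.2) →
      (∀ r ∈ pre, r.2 ∈ acc) →
      (l.foldl (fun out e => if e.2 ∈ out then out else out ++ [e.2]) acc).Pairwise
        (fun c d => Kf c ≤ Kf d) := by
  intro l
  induction l with
  | nil =>
    intro pre acc h0 hacc hrel hpre
    simpa using hacc
  | cons p t ih =>
    intro pre acc h0 hacc hrel hpre
    rw [List.foldl_cons]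
    by_cases hmem : p.2 ∈ acc
    · rw [if_pos hmem]
      refine ih (pre ++ [p]) acc (by simpa using h0)
        hacc (fun c hc q hq hqn => hrel c hc q (List.mem_cons_of_mem _ hq) hqn) ?_
      intro r hr
      rcases List.mem_append.1 hr with h | h
      · exact hpre r h
      · rw [List.mem_singleton.1 h]; exact hmem
    · rw [if_neg hmem]
      have hpl : p ∈ l0 := by rw [h0]; exact List.mem_append_right _ (List.mem_cons_self)
      refine ih (pre ++ [p]) (acc ++ [p.2]) (by simpa using h0) ?_ ?_ ?_
      · rw [List.pairwise_append]
        refine ⟨hacc, List.pairwise_singleton _ _, ?_⟩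
        intro c hc d hd
        rw [List.mem_singleton.1 hd]
        exact hrel c hc p (List.mem_cons_self) hmem
      · intro c hc q hq hqn
        have hqacc : q.2 ∉ acc := fun hn => hqn (List.mem_append_left _ hn)
        have hqp2 : q.2 ≠ p.2 := fun hn => hqn (List.mem_append_right _ (by rw [hn]; exact List.mem_singleton_self _))
        rcases List.mem_append.1 hc with hc | hc
        · exact hrel c hc q (List.mem_cons_of_mem _ hq) hqacc
        · rw [List.mem_singleton.1 hc]
          -- Kf p.2 ≤ Kf q.2 via the witness of the minimum of q.2
          have hql0 : q ∈ l0 := by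
            rw [h0]; exact List.mem_append_right _ (List.mem_cons_of_mem _ hq)
          obtain ⟨r, hr, hr2, hr1⟩ := H3 q hql0
          rcases List.mem_append.1 (by rw [← h0]; exact hr : r ∈ pre ++ p :: t) with hrp | hrt
          · exact absurd (hr2 ▸ hpre r hrp) hqacc
          · have hple : p.1 ≤ r.1 := by
              rcases List.mem_cons.1 hrt with rfl | hrt
              · exact le_refl _
              · have hpt : (p :: t).Pairwise (fun a b => a.1 ≤ b.1) :=
                  (List.pairwise_append.1 (h0 ▸ H1)).2.1
                exact (List.pairwise_cons.1 hpt).1 r hrt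
            calc Kf p.2 ≤ p.1 := H2 p hpl
              _ ≤ r.1 := hple
              _ = Kf q.2 := hr1
      · intro r hr
        rcases List.mem_append.1 hr with h | h
        · exact List.mem_append_left _ (hpre r h)
        · rw [List.mem_singleton.1 h]
          exact List.mem_append_right _ (List.mem_singleton_self _)

lemma pvOutA_pairwise (lw : String) : (pvOutA lw).Pairwise (fun c d => pvK lw c ≤ pvK lw d) := by
  rw [pvOutA]
  refine pv_dedup_pairwise (fun c => pvK lw c) (pvSA lw) ?_ ?_ ?_ (pvSA lw) [] [] rfl
    List.Pairwise.nil (fun c hc => absurd hc (List.not_mem_nil)) (fun r hr => absurd hr (List.not_mem_nil))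
  · exact PySem.List.sorted_pairwise (pvFound lw) (fun item => item.1)
  · intro e he
    obtain ⟨p, hp, h2, h0, h1⟩ := (pvSA_mem lw e).1 he
    refine le_of_le_of_eq (pvK_isMin lw e.2 (pvf lw p.1) ?_) h1.symm
    exact (pvVals_mem lw e.2 _).2 ⟨p, hp, h2, h0, rfl⟩
  · intro e he
    obtain ⟨p, hp, h2, h0, h1⟩ := (pvSA_mem lw e).1 he
    have hne : pvVals lw e.2 ≠ [] :=
      List.ne_nil_of_mem ((pvVals_mem lw e.2 _).2 ⟨p, hp, h2, h0, rfl⟩)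
    obtain ⟨q, hq, hq2, hq0, hqe⟩ := (pvVals_mem lw e.2 _).1 (pvK_mem lw e.2 hne)
    exact ⟨(pvK lw e.2, e.2), (pvSA_mem lw _).2 ⟨q, hq, hq2, hq0, hqe⟩, rfl, rfl⟩

lemma pv_fold_dedup_eq_ofList (l : List (Int × String)) :
    l.foldl (fun out e => if e.2 ∈ out then out else out ++ [e.2]) [] =
      PySem.Set.ofList (l.map (fun e => e.2)) := by
  rw [← PySem.Set.update_nil_left, PySem.Set.update_map_eq_foldl_add]
  exact PySem.List.foldl_congr_mem l _ _ []
    (fun acc x _ => by rw [PySem.Set.add_eq_ite])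

lemma pv_vals_ne_nil (lw c : String) :
    pvVals lw c ≠ [] ↔ ∃ p ∈ pvCurrencyAliases, p.2 = c ∧ 0 ≤ pvf lw p.1 := by
  constructor
  · intro h
    obtain ⟨v, hv⟩ := List.exists_mem_of_ne_nil _ h
    obtain ⟨p, hp, h2, h0, _⟩ := (pvVals_mem lw c v).1 hv
    exact ⟨p, hp, h2, h0⟩
  · rintro ⟨p, hp, h2, h0⟩
    exact List.ne_nil_of_mem ((pvVals_mem lw c (pvf lw p.1)).2 ⟨p, hp, h2, h0, rfl⟩)

lemma pvOutA_mem (lw c : String) : c ∈ pvOutA lw ↔ pvVals lw c ≠ [] := by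
  rw [pvOutA, pv_fold_dedup_eq_ofList, PySem.Set.mem_ofList, List.mem_map, pv_vals_ne_nil]
  constructor
  · rintro ⟨e, he, rfl⟩
    obtain ⟨p, hp, h2, h0, _⟩ := (pvSA_mem lw e).1 he
    exact ⟨p, hp, h2, h0⟩
  · rintro ⟨p, hp, h2, h0⟩
    exact ⟨(pvf lw p.1, c), (pvSA_mem lw _).2 ⟨p, hp, h2, h0, rfl⟩, rfl⟩

lemma pvOutA_nodup (lw : String) : (pvOutA lw).Nodup := by
  rw [pvOutA, pv_fold_dedup_eq_ofList]
  exact PySem.Set.nodup_ofList _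

-- ---------- B side ----------

def pvStep (lw : String) (best : PySem.Dict String Int) (item : String × String) : PySem.Dict String Int :=
  let idx := PySem.Str.find lw item.1
  if 0 ≤ idx ∧ (best.contains item.2 = false ∨ idx < best.getD item.2 0)
  then best.insert item.2 idx else best

def pvBest (lw : String) : PySem.Dict String Int := pvCurrencyAliases.foldl (pvStep lw) PySem.Dict.empty

def pvOutB (lw : String) : List String :=
  (PySem.List.sorted (pvBest lw).items (fun kv => kv.2) false).map (fun kv => kv.1)

lemma portB_eq (text : String) : find_currency_codes_py_alt text = pvOutB (PySem.Str.lower text) := by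
  rfl

def pvgmin (o : Option Int) (v : Int) : Option Int :=
  some (match o with | none => v | some w => min w v)

lemma pv_step_get? (lw : String) (c : String) (d : PySem.Dict String Int) (p : String × String) :
    (pvStep lw d p).get? c =
      (if (p.2 == c && decide (0 ≤ pvf lw p.1)) = true
       then pvgmin (d.get? c) (pvf lw p.1) else d.get? c) := by
  rw [pvStep]
  by_cases h0 : 0 ≤ PySem.Str.find lw p.1
  · by_cases hc : p.2 = c
    · subst hc
      rw [if_pos (show (p.2 == p.2 && decide (0 ≤ pvf lw p.1)) = true by simp only [beq_self_eq_true, Bool.true_and, decide_eq_true_eq]; exact h0)]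
      cases hg : d.get? p.2 with
      | none =>
        have hcon : d.contains p.2 = false := by
          rw [PySem.Dict.contains_eq_isSome_get?, hg]; rfl
        rw [if_pos ⟨h0, Or.inl hcon⟩, PySem.Dict.get?_insert_self]
        rfl
      | some w =>
        have hcon : d.contains p.2 = true := by
          rw [PySem.Dict.contains_eq_isSome_get?, hg]; rfl
        have hgd : d.getD p.2 0 = w := by rw [PySem.Dict.getD_eq_get?_getD, hg]; rfl
        by_cases hlt : PySem.Str.find lw p.1 < w
        · rw [if_pos ⟨h0, Or.inr (by rw [hgd]; exact hlt)⟩, PySem.Dict.get?_insert_self]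
          show some (PySem.Str.find lw p.1) = some (min w (PySem.Str.find lw p.1))
          rw [min_eq_right (le_of_lt hlt)]
        · rw [if_neg (by rintro ⟨-, h | h⟩
                         · rw [hcon] at h; exact absurd h (by simp)
                         · rw [hgd] at h; exact hlt h), hg]
          show some w = some (min w (PySem.Str.find lw p.1))
          rw [min_eq_left (not_lt.mp hlt)]
    · have hbe : (p.2 == c && decide (0 ≤ pvf lw p.1)) = false := by
        simp [hc]
      simp only [hbe, Bool.false_eq_true, if_false]
      split
      · exact PySem.Dict.get?_insert_of_ne d _ (fun h => hc h.symm)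
      · rfl
  · have hbe : (p.2 == c && decide (0 ≤ pvf lw p.1)) = false := by
      simp only [pvf, Bool.and_eq_false_iff, decide_eq_false_iff_not]
      exact Or.inr h0
    simp only [hbe, Bool.false_eq_true, if_false]
    rw [if_neg (fun h => h0 h.1)]

lemma pv_bfold_get? (lw : String) (c : String) :
    ∀ (l : List (String × String)) (d : PySem.Dict String Int),
      (l.foldl (pvStep lw) d).get? c =
        (((l.filter (fun p => p.2 == c && decide (0 ≤ pvf lw p.1))).map (fun p => pvf lw p.1)).foldl
          pvgmin (d.get? c)) := by
  intro l
  induction l with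
  | nil => intro d; rfl
  | cons p t ih =>
    intro d
    rw [List.foldl_cons, ih, List.filter_cons]
    by_cases hb : (p.2 == c && decide (0 ≤ pvf lw p.1)) = true
    · rw [if_pos hb, List.map_cons, List.foldl_cons, pv_step_get? lw c d p, if_pos hb]
    · rw [if_neg hb, pv_step_get? lw c d p, if_neg hb]

lemma pv_foldl_gmin_some : ∀ (t : List Int) (w : Int), t.foldl pvgmin (some w) = some (t.foldl min w)
  | [], w => rfl
  | v :: t, w => by
    show t.foldl pvgmin (some (min w v)) = some ((v :: t).foldl min w)
    rw [pv_foldl_gmin_some t (min w v)]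
    rfl

lemma pv_foldl_gmin_min? : ∀ (vs : List Int), vs.foldl pvgmin none = PySem.List.min? vs (fun v => v) := by
  intro vs
  cases vs with
  | nil => rfl
  | cons x t =>
    rw [PySem.List.min?_id_cons]
    show t.foldl pvgmin (some x) = _
    rw [pv_foldl_gmin_some]

lemma pvBest_get? (lw c : String) :
    (pvBest lw).get? c = PySem.List.min? (pvVals lw c) (fun v => v) := by
  rw [pvBest, pv_bfold_get? lw c, PySem.Dict.get?_empty, pv_foldl_gmin_min?, pvVals]

lemma pvBest_get?_eq (lw c : String) (h : pvVals lw c ≠ []) : (pvBest lw).get? c = some (pvK lw c) := by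
  rw [pvBest_get?, pvK_some lw c h]

lemma pv_step_nodup (lw : String) :
    ∀ (l : List (String × String)) (d : PySem.Dict String Int),
      d.keys.Nodup → (l.foldl (pvStep lw) d).keys.Nodup := by
  intro l
  induction l with
  | nil => intro d hd; exact hd
  | cons p t ih =>
    intro d hd
    apply ih
    rw [pvStep]
    split
    · exact PySem.Dict.nodup_keys_insert d p.2 _ hd
    · exact hd

lemma pvBest_nodup_keys (lw : String) : (pvBest lw).keys.Nodup := by
  exact pv_step_nodup lw _ _ PySem.Dict.nodup_keys_empty

lemma pv_mem_items_val (lw : String) (kv : String × Int) (h : kv ∈ (pvBest lw).items) :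
    pvVals lw kv.1 ≠ [] ∧ kv.2 = pvK lw kv.1 := by
  have hg : (pvBest lw).get? kv.1 = some kv.2 := by
    cases kv with
    | mk k v => exact PySem.Dict.get?_of_mem_items _ h (pvBest_nodup_keys lw)
  rw [pvBest_get?] at hg
  have hne : pvVals lw kv.1 ≠ [] := by
    intro hnil
    rw [hnil] at hg
    rw [(PySem.List.min?_eq_none_iff ([] : List Int) (fun v => v)).2 rfl] at hg
    exact absurd hg (by simp)
  refine ⟨hne, ?_⟩
  have h2 := pvK_some lw kv.1 hne
  rw [hg] at h2
  exact Option.some_inj.1 h2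

lemma pvOutB_mem (lw c : String) : c ∈ pvOutB lw ↔ pvVals lw c ≠ [] := by
  rw [pvOutB, List.mem_map]
  constructor
  · rintro ⟨kv, hkv, rfl⟩
    exact (pv_mem_items_val lw kv ((PySem.List.mem_sorted _ _ _ _).1 hkv)).1
  · intro h
    have hmem : (c, pvK lw c) ∈ (pvBest lw).items :=
      (PySem.Dict.get?_eq_some_iff_mem_items _ _ _ (pvBest_nodup_keys lw)).1 (pvBest_get?_eq lw c h)
    exact ⟨(c, pvK lw c), (PySem.List.mem_sorted _ _ _ _).2 hmem, rfl⟩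

lemma pvOutB_nodup (lw : String) : (pvOutB lw).Nodup := by
  rw [pvOutB]
  have hperm : ((PySem.List.sorted (pvBest lw).items (fun kv => kv.2) false).map
      (fun kv => kv.1)).Perm ((pvBest lw).items.map (fun kv => kv.1)) :=
    (PySem.List.sorted_perm _ _ _).map _
  have hkeys : ((pvBest lw).items.map (fun kv => kv.1)).Nodup := pvBest_nodup_keys lw
  exact hperm.nodup_iff.2 hkeys

lemma pvOutB_pairwise (lw : String) : (pvOutB lw).Pairwise (fun c d => pvK lw c < pvK lw d) := by
  rw [pvOutB, List.pairwise_map]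
  have hs := PySem.List.sorted_pairwise (pvBest lw).items (fun kv => kv.2)
  have hne : (PySem.List.sorted (pvBest lw).items (fun kv => kv.2) false).Pairwise
      (fun a b => a.1 ≠ b.1) := by
    have h := pvOutB_nodup lw
    rw [pvOutB] at h
    exact List.pairwise_map.1 h
  refine List.Pairwise.imp_of_mem ?_ (hs.and hne)
  intro a b ha hb hab
  obtain ⟨hma, hva⟩ := pv_mem_items_val lw a ((PySem.List.mem_sorted _ _ _ _).1 ha)
  obtain ⟨hmb, hvb⟩ := pv_mem_items_val lw b ((PySem.List.mem_sorted _ _ _ _).1 hb)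
  have hle : pvK lw a.1 ≤ pvK lw b.1 := by rw [← hva, ← hvb]; exact hab.1
  have hneq : pvK lw a.1 ≠ pvK lw b.1 := fun h => hab.2 (pvK_inj lw a.1 b.1 hma hmb h)
  exact lt_of_le_of_ne hle hneq

-- ---------- assembly ----------

lemma pvOut_eq (lw : String) : pvOutA lw = pvOutB lw := by
  have hperm : (pvOutB lw).Perm (pvOutA lw) :=
    (List.perm_ext_iff_of_nodup (pvOutB_nodup lw) (pvOutA_nodup lw)).2
      (fun c => by rw [pvOutB_mem, pvOutA_mem])
  have e2 : PySem.List.sorted (pvOutA lw) (fun c => pvK lw c) = pvOutB lw :=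
    PySem.List.sorted_eq_of_perm_of_pairwise_lt (pvOutA lw) (pvOutB lw) (fun c => pvK lw c)
      hperm (pvOutB_pairwise lw)
  have e1 : PySem.List.sorted (pvOutA lw) (fun c => pvK lw c) = pvOutA lw :=
    PySem.List.sorted_eq_self_of_pairwise (pvOutA lw) (fun c => pvK lw c) (pvOutA_pairwise lw)
  rw [← e1, e2]

-- ===== VERDICT (by name: the statement is the Claim_ definition above) =====
theorem find_currency_codes_py_spec : Claim_equal_find_currency_codes_py := by
  intro text _
  show find_currency_codes_py text = find_currency_codes_py_alt text
  rw [portA_eq, portB_eq, pvOut_eq]
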